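-- pv_equiv track=rewrite | github.com/DANKnespl/AOC_2024 | days/day19.py | dictionarize
-- ===== SOURCE A (Python) =====
-- def dictionarize(sequences, patterns):
--     containment = {}
--     for _, seqence in enumerate(sequences):
--         for _, pattern in enumerate(patterns):
--             if pattern in seqence:
--                 if seqence not in containment:
--                     containment[seqence] = []
--                 containment[seqence].append(pattern)
--     return containment
-- ===== SOURCE B (Python) =====
-- def dictionarize(sequences, patterns):
--     # Substring index: enumerate every substring of the sequence once into a set,
--     # then each pattern is decided by one set lookup instead of a substring scan.
--     containment = {}
--     for sequence in sequences:
--         subs = {sequence[i:j] for j in range(len(sequence) + 1) for i in range(j + 1)}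
--         matched = [p for p in patterns if p in subs]
--         if matched:
--             containment.setdefault(sequence, []).extend(matched)
--     return containment
-- ===== Notes on version B (the rewrite author's own statement) =====
-- stated objective: alternative
-- what changed: B builds, per sequence, a set of all its substrings (a substring index) and decides each pattern by one set lookup, replacing A's per-pattern substring scan and create-on-first-match dict mutation with an index build plus a filter and a single setdefault/extend. (measured faster at large sizes: one hash lookup per pattern replaces repeated substring scans)
import Mathlib
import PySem

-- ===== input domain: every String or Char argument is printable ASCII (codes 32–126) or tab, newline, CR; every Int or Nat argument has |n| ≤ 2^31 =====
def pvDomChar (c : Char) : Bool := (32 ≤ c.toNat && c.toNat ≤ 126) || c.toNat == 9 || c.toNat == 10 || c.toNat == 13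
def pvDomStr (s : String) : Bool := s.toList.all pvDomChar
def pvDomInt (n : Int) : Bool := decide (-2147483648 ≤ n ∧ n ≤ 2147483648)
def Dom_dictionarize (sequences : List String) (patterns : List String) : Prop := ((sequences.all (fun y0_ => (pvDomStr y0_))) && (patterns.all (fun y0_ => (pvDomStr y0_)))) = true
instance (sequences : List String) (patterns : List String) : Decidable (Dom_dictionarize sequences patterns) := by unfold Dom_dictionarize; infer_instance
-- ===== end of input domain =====

-- B indexes each sequence once: a set of all its substrings, so each pattern is
-- decided by one set lookup instead of a substring scan (alternative algorithm).

-- ===== PORT A =====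
def dictionarize (sequences : List String) (patterns : List String) : List (String × List String) :=
  (sequences.foldl (fun d seqence =>
      patterns.foldl (fun d pattern =>
        if PySem.Str.isIn pattern seqence then
          (if d.contains seqence = false then d.insert seqence ([] : List String) else d).modify
            seqence [] (fun v => v ++ [pattern])
        else d) d)
    PySem.Dict.empty).items

-- ===== PORT B =====
-- subs = {sequence[i:j] for j in range(len(sequence)+1) for i in range(j+1)}
def pvSubs (sequence : String) : PySem.Set String :=
  PySem.Set.ofList
    ((PySem.List.pyRange 0 ((PySem.Str.len sequence : Int) + 1) 1).flatMap (fun j =>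
      (PySem.List.pyRange 0 (j + 1) 1).map (fun i =>
        PySem.Str.slice sequence (some i) (some j))))

def dictionarize_alt (sequences : List String) (patterns : List String) : List (String × List String) :=
  (sequences.foldl (fun d sequence =>
      let subs := pvSubs sequence
      let matched := patterns.filter (fun p => PySem.Set.contains subs p)
      if matched ≠ [] then
        (d.setdefault sequence []).modify sequence [] (fun v => v ++ matched)
      else d)
    PySem.Dict.empty).items

-- ===== PRECONDITION & SPEC =====
def Spec_dictionarize (sequences : List String) (patterns : List String) (out : List (String × List String)) : Prop := out = dictionarize_alt sequences patterns
instance (sequences : List String) (patterns : List String) (out : List (String × List String)) : Decidable (Spec_dictionarize sequences patterns out) := by unfold Spec_dictionarize; infer_instance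

-- ===== CLAIM (what is proved, stated in full; the proofs are below) =====
def Claim_equal_dictionarize : Prop := ∀ (sequences : List String) (patterns : List String), Dom_dictionarize sequences patterns → Spec_dictionarize sequences patterns (dictionarize sequences patterns)

-- ===== LEMMAS AND PROOFS =====

-- pointwise-equal step functions fold alike
theorem pv_foldl_ext {α δ : Type} (f g : δ → α → δ) (h : ∀ d s, f d s = g d s) :
    ∀ (l : List α) (d : δ), l.foldl f d = l.foldl g d := by
  intro l
  induction l with
  | nil => intro d; rfl
  | cons a t ih => intro d; simp only [List.foldl_cons, h, ih]

-- A's guard-then-create is setdefault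
theorem pv_branch_eq (d : PySem.Dict String (List String)) (k : String) :
    (if d.contains k = false then d.insert k ([] : List String) else d) = d.setdefault k [] := by
  by_cases h : d.contains k = true
  · simp [h, PySem.Dict.setdefault_of_contains d _ h]
  · have h' : d.contains k = false := by simpa using h
    simp [h', PySem.Dict.setdefault_of_not_contains d _ h']

-- two modifies of the same key compose
theorem pv_modify_modify (d : PySem.Dict String (List String)) (k : String)
    (f g : List String → List String) :
    (d.modify k [] f).modify k [] g = d.modify k [] (fun v => g (f v)) := by
  unfold PySem.Dict.modify
  rw [PySem.Dict.getD_insert_self, PySem.Dict.insert_insert_self]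

-- A's inner loop over patterns = setdefault + one extend by the filtered row
theorem pv_inner_eq (ps : List String) (s : String) :
    ∀ d : PySem.Dict String (List String),
      ps.foldl (fun d pattern =>
          if PySem.Str.isIn pattern s then
            (if d.contains s = false then d.insert s ([] : List String) else d).modify
              s [] (fun v => v ++ [pattern])
          else d) d
      = (if ps.filter (fun p => PySem.Str.isIn p s) ≠ [] then
          (d.setdefault s []).modify s [] (fun v => v ++ ps.filter (fun p => PySem.Str.isIn p s))
         else d) := by
  induction ps with
  | nil => intro d; simp
  | cons p t ih =>
    intro d
    simp only [List.foldl_cons, List.filter_cons]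
    by_cases hp : PySem.Str.isIn p s = true
    · rw [if_pos hp, if_pos hp, pv_branch_eq, ih]
      have hcont : ((d.setdefault s []).modify s [] (fun v => v ++ [p])).contains s = true := by
        simp [PySem.Dict.contains_modify]
      by_cases ht : List.filter (fun p => PySem.Str.isIn p s) t = []
      · rw [ht]
        simp
      · rw [if_pos ht, if_pos (List.cons_ne_nil _ _),
          PySem.Dict.setdefault_of_contains _ _ hcont, pv_modify_modify]
        simp only [List.append_assoc, List.singleton_append]
    · rw [if_neg hp, if_neg hp, ih]

-- a clamped take-of-drop is an infix
theorem pv_take_drop_infix (l : List Char) (a b : Nat) : (l.drop a).take b <:+: l :=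
  ((l.drop a).take_prefix b).isInfix.trans (l.drop_suffix a).isInfix

-- membership in the substring index = Python's 'pattern in sequence'
theorem pv_contains_subs (p s : String) :
    PySem.Set.contains (pvSubs s) p = PySem.Str.isIn p s := by
  rw [Bool.eq_iff_iff, PySem.Set.contains_iff, PySem.Str.isIn_iff_infix]
  unfold pvSubs
  rw [PySem.Set.mem_ofList]
  simp only [List.mem_flatMap, List.mem_map, PySem.List.mem_pyRange_one]
  constructor
  · rintro ⟨j, ⟨hj0, hj1⟩, i, ⟨hi0, hi1⟩, rfl⟩
    have h : (PySem.Str.slice s (some i) (some j)).toList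
        = (s.toList.drop i.toNat).take (j.toNat - i.toNat) := by
      simp [PySem.Str.slice, PySem.List.slice_toNat _ hi0 hj0]
    rw [h]
    exact pv_take_drop_infix _ _ _
  · intro h
    obtain ⟨t, u, hl⟩ := h
    refine ⟨(t.length + p.toList.length : Nat), ⟨by positivity, ?_⟩,
      (t.length : Nat), ⟨by positivity, by push_cast; omega⟩, ?_⟩
    · have : t.length + p.toList.length ≤ s.toList.length := by
        rw [← hl]
        simp [List.length_append]
      simp only [PySem.Str.len_eq]
      push_cast
      omega
    · have h3 : s.toList.drop t.length = p.toList ++ u := by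
        rw [← hl, List.append_assoc, List.drop_left]
      have htl : (PySem.Str.slice s (some (t.length : Int))
          (some ((t.length + p.toList.length : Nat) : Int))).toList = p.toList := by
        rw [PySem.Str.toList_slice, PySem.Chars.slice_eq_listSlice,
          PySem.List.slice_natCast s.toList t.length (t.length + p.toList.length), h3,
          Nat.add_sub_cancel_left, List.take_left]
      have h4 := congrArg String.ofList htl
      simp only [String.ofList_toList] at h4
      exact h4

theorem pv_main (sequences patterns : List String) :
    dictionarize sequences patterns = dictionarize_alt sequences patterns := by
  unfold dictionarize dictionarize_alt
  congr 1
  apply pv_foldl_ext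
  intro d s
  rw [pv_inner_eq]
  have hf : patterns.filter (fun p => PySem.Set.contains (pvSubs s) p)
      = patterns.filter (fun p => PySem.Str.isIn p s) :=
    List.filter_congr (fun p _ => pv_contains_subs p s)
  simp only [hf]

-- ===== VERDICT (by name: the statement is the Claim_ definition above) =====
theorem dictionarize_spec : Claim_equal_dictionarize := by
  intro sequences patterns _
  unfold Spec_dictionarize
  exact pv_main sequences patterns
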